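-- pv_equiv track=rewrite | github.com/aviyallapalli/pypatent | pypatent/visualize.py | parse_conll_text
-- ===== SOURCE A (Python) =====
-- def parse_conll_text(text):
--     text = text.split("\n")
--     tree = []
--     forest = []
--     for line in text:
--         node = line.split("\t")
--         if len(node) != 1:
--             tree.append(node)
--         else:
--             if len(tree) != 0:
--                 forest.append(tree)
--                 tree = []
--     if len(tree) != 0:
--         forest.append(tree)
--
--     return forest
-- ===== SOURCE B (Python) =====
-- def parse_conll_text(text):
--     rows = [line.split("\t") for line in text.split("\n")]
--     forest = []
--     i, n = 0, len(rows)
--     while i < n: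
--         if len(rows[i]) != 1:
--             j = i + 1
--             while j < n and len(rows[j]) != 1:
--                 j += 1
--             forest.append(rows[i:j])
--             i = j
--         else:
--             i += 1
--     return forest
-- ===== Notes on version B (the rewrite author's own statement) =====
-- stated objective: alternative
-- what changed: Replaced A's tree-accumulator/flush state machine with a pre-split row list scanned by run extraction (span over consecutive multi-field rows), with no carried tree state and no final flush.
import Mathlib
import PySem

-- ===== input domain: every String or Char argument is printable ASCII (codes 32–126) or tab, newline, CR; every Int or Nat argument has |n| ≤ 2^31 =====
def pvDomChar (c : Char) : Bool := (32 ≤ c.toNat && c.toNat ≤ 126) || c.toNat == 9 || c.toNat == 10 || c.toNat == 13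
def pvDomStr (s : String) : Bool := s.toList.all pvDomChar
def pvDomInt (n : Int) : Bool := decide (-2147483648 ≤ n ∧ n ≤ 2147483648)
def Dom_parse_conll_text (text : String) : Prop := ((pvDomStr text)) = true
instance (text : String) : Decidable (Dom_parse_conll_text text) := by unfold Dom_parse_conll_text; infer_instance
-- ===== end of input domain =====

-- B replaces A's tree-accumulator/flush state machine with a run-extraction scan over pre-split rows (alternative decomposition, same cost).

-- s.split(sep) for a nonempty separator (shared split helper of both ports)
def pvSplit (s : String) (sep : List Char) : List String :=
  (PySem.Chars.splitOn s.toList sep).map String.ofList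

-- ===== PORT A =====
def parse_conll_text (text : String) : List (List (List String)) :=
  let lines := pvSplit text ['\n']
  let st := lines.foldl
    (fun (st : List (List String) × List (List (List String))) line =>
      let node := pvSplit line ['\t']
      if node.length ≠ 1 then (st.1 ++ [node], st.2)
      else if st.1.length ≠ 0 then ([], st.2 ++ [st.1]) else st)
    ([], [])
  if st.1.length ≠ 0 then st.2 ++ [st.1] else st.2

-- ===== PORT B =====
-- the outer while loop of Source B: extract each maximal run of multi-field rows
def pvRuns (rows : List (List String)) : List (List (List String)) :=
  match rows with
  | [] => []
  | r :: rest =>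
    if r.length ≠ 1 then
      (r :: rest.takeWhile (fun x => x.length != 1)) ::
        pvRuns (rest.dropWhile (fun x => x.length != 1))
    else pvRuns rest
termination_by rows.length
decreasing_by
  · exact Nat.lt_succ_of_le (List.length_dropWhile_le _ _)
  · simp

def parse_conll_text_alt (text : String) : List (List (List String)) :=
  pvRuns ((pvSplit text ['\n']).map (fun line => pvSplit line ['\t']))

-- ===== PRECONDITION & SPEC =====
def Spec_parse_conll_text (text : String) (out : List (List (List String))) : Prop := out = parse_conll_text_alt text
instance (text : String) (out : List (List (List String))) : Decidable (Spec_parse_conll_text text out) := by unfold Spec_parse_conll_text; infer_instance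

-- ===== CLAIM (what is proved, stated in full; the proofs are below) =====
def Claim_equal_parse_conll_text : Prop := ∀ (text : String), Dom_parse_conll_text text → Spec_parse_conll_text text (parse_conll_text text)

-- ===== LEMMAS AND PROOFS =====

-- A's fold step, on an already-split row
def pvStep (st : List (List String) × List (List (List String))) (node : List String) :
    List (List String) × List (List (List String)) :=
  if node.length ≠ 1 then (st.1 ++ [node], st.2)
  else if st.1.length ≠ 0 then ([], st.2 ++ [st.1]) else st

def pvFlush (st : List (List String) × List (List (List String))) : List (List (List String)) :=
  if st.1.length ≠ 0 then st.2 ++ [st.1] else st.2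

-- the loop invariant: A's fold+flush from any state equals forest ++ (pending tree glued onto B's runs)
theorem pvMain (rows : List (List String)) :
    ∀ (tree : List (List String)) (forest : List (List (List String))),
    pvFlush (rows.foldl pvStep (tree, forest)) =
      forest ++ (if tree = [] then pvRuns rows
                 else (tree ++ rows.takeWhile (fun x => x.length != 1)) ::
                        pvRuns (rows.dropWhile (fun x => x.length != 1))) := by
  induction rows with
  | nil =>
    intro tree forest
    by_cases h : tree = [] <;> simp [pvFlush, pvRuns, h]
  | cons r rest ih =>
    intro tree forest
    by_cases hr : r.length = 1
    · have hx : ¬ (r.length ≠ 1) := by simp [hr]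
      by_cases ht : tree = []
      · simp only [List.foldl_cons, pvStep, if_neg hx, ht]
        simp only [List.length_nil, ne_eq, not_true_eq_false, if_false]
        rw [ih [] forest]
        simp [pvRuns, hr]
      · have hl : tree.length ≠ 0 := by simpa using ht
        simp only [List.foldl_cons, pvStep, if_neg hx, if_pos hl]
        rw [ih [] (forest ++ [tree])]
        simp [pvRuns, ht, hr]
    · have hb : (r.length != 1) = true := by simpa using hr
      by_cases ht : tree = []
      · simp only [List.foldl_cons, pvStep, if_pos hr, ht]
        rw [ih ([] ++ [r]) forest]
        simp [pvRuns, hr]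
      · simp only [List.foldl_cons, pvStep, if_pos hr]
        rw [ih (tree ++ [r]) forest]
        have hne : tree ++ [r] ≠ [] := by simp
        simp [hne, ht, hb]

-- A's port written with the fold step factored out (definitional)
theorem pvA_eq (text : String) :
    parse_conll_text text =
      pvFlush ((pvSplit text ['\n']).foldl
        (fun st line => pvStep st (pvSplit line ['\t'])) ([], [])) := rfl

-- ===== VERDICT (by name: the statement is the Claim_ definition above) =====
theorem parse_conll_text_spec : Claim_equal_parse_conll_text := by
  intro text _
  unfold Spec_parse_conll_text parse_conll_text_alt
  rw [pvA_eq, ← List.foldl_map]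
  simpa using pvMain ((pvSplit text ['\n']).map (fun line => pvSplit line ['\t'])) [] []
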